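-- pv_equiv track=rewrite | github.com/Sobol-R/InfLab | Utils.py | from_fib_to_10
-- ===== SOURCE A (Python) =====
-- def from_fib_to_10(num):
--     res = 0
--     num = num[::-1]
--     data = get_fib_nums_by_cnt(len(num))
--     for i in range(len(data)-1, -1, -1):
--         if num[i] == "1":
--             res += data[i]
--     return res
--
-- def get_fib_nums_by_cnt(cnt):
--     res = list()
--     res.append(1)
--     res.append(1)
--     i = 1
--     while len(res) != cnt+1:
--         res.append(res[i] + res[i-1])
--         i += 1
--     del res[0]
--     return res
-- ===== SOURCE B (Python) =====
-- def from_fib_to_10(num):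
--     res = 0
--     a, b = 1, 2
--     for ch in reversed(num):
--         if ch == "1":
--             res += a
--         a, b = b, a + b
--     return res
-- ===== Notes on version B (the rewrite author's own statement) =====
-- stated objective: simpler
-- what changed: B drops the helper and the precomputed weight table entirely: a single pass over the reversed digits keeps two running Fibonacci values and adds the current weight when the digit matches, instead of first building the whole Fibonacci list and then scanning it backwards by index (no intermediate list, one pass instead of two).
-- outside the precondition, e.g. on from_fib_to_10(''): A does not finish within the time limit, B returns 0
import Mathlib
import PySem

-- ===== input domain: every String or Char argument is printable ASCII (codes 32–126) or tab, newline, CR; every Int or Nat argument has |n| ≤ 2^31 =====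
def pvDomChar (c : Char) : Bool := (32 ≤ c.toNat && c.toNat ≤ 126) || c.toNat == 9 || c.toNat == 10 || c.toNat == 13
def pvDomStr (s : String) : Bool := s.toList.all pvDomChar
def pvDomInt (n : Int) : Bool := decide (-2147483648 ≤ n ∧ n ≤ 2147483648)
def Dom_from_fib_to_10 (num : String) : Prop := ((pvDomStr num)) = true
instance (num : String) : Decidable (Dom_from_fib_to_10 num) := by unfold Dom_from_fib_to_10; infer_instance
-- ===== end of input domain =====

-- B replaces A's precomputed Fibonacci weight table and backward index scan by one pass over the
-- reversed digits that maintains two running Fibonacci values (objective: simpler).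

-- ===== PORT A =====
-- the while loop of get_fib_nums_by_cnt; fuel = cnt makes it total in Lean (on cnt = 0 the
-- Python loop never terminates; that input is excluded by Pre_ below, for cnt ≥ 1 the fuel suffices)
def fibLoopA (cnt : Nat) (fuel : Nat) (res : List Int) (i : Nat) : List Int :=
  match fuel with
  | 0 => res
  | f + 1 =>
      if res.length = cnt + 1 then res
      else fibLoopA cnt f
        (res ++ [PySem.List.pyGetD res (i : Int) 0 + PySem.List.pyGetD res ((i : Int) - 1) 0])
        (i + 1)

def get_fib_nums_by_cnt (cnt : Nat) : List Int :=
  (fibLoopA cnt cnt [1, 1] 1).drop 1   -- del res[0]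

def from_fib_to_10 (num : String) : Int :=
  -- num = num[::-1]
  let numRev : List Char := (((PySem.Str.slice? num none none (-1)).getD "").toList)
  let data : List Int := get_fib_nums_by_cnt numRev.length
  -- for i in range(len(data)-1, -1, -1): if num[i] == "1": res += data[i]
  (PySem.List.pyRange ((data.length : Int) - 1) (-1) (-1)).foldl
    (fun res i =>
      if PySem.List.pyGetD numRev i ' ' = '1' then res + PySem.List.pyGetD data i 0 else res)
    0

-- ===== PORT B =====
def from_fib_to_10_alt (num : String) : Int :=
  (num.toList.reverse.foldl
    (fun (st : Int × Int × Int) ch =>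
      ((if ch = '1' then st.1 + st.2.1 else st.1), st.2.2, st.2.1 + st.2.2))
    (0, 1, 2)).1

-- ===== PRECONDITION & SPEC =====
-- Pre_ excludes only the empty string, on which A's helper loops forever (Python never returns).
def Pre_from_fib_to_10 (num : String) : Prop := num.toList ≠ []
instance (num : String) : Decidable (Pre_from_fib_to_10 num) := by
  unfold Pre_from_fib_to_10; infer_instance
def pvWitness_from_fib_to_10 : String := "10100"

def Spec_from_fib_to_10 (num : String) (out : Int) : Prop := out = from_fib_to_10_alt num
instance (num : String) (out : Int) : Decidable (Spec_from_fib_to_10 num out) := by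
  unfold Spec_from_fib_to_10; infer_instance

-- ===== CLAIM (what is proved, stated in full; the proofs are below) =====
def Claim_equal_from_fib_to_10 : Prop :=
  ∀ (num : String), Dom_from_fib_to_10 num → Pre_from_fib_to_10 num →
    Spec_from_fib_to_10 num (from_fib_to_10 num)

-- ===== LEMMAS AND PROOFS =====

-- running-pair sum: the value both programs compute, as a recursion over the reversed digits
def fibSum : List Char → Int → Int → Int
  | [], _, _ => 0
  | c :: t, a, b => (if c = '1' then a else 0) + fibSum t b (a + b)

-- the Fibonacci weight list [a, b, a+b, …] of a given length
def gW : Nat → Int → Int → List Int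
  | 0, _, _ => []
  | n + 1, a, b => a :: gW n b (a + b)

-- k-th element of the running pair
def fibF : Nat → Int → Int → Int
  | 0, a, _ => a
  | k + 1, a, b => fibF k b (a + b)

theorem length_gW (n : Nat) (a b : Int) : (gW n a b).length = n := by
  induction n generalizing a b with
  | zero => rfl
  | succ n ih => simp [gW, ih]

theorem gW_getD (n k : Nat) (a b : Int) (h : k < n) : (gW n a b).getD k 0 = fibF k a b := by
  induction n generalizing a b k with
  | zero => omega
  | succ n ih =>
    cases k with
    | zero => rfl
    | succ k => simpa [gW, fibF] using ih k b (a + b) (by omega)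

theorem gW_snoc (n : Nat) (a b : Int) : gW (n + 1) a b = gW n a b ++ [fibF n a b] := by
  induction n generalizing a b with
  | zero => rfl
  | succ n ih =>
    rw [show gW (n + 1 + 1) a b = a :: gW (n + 1) b (a + b) from rfl, ih b (a + b)]
    rfl

theorem fibF_rec (k : Nat) (a b : Int) : fibF (k + 2) a b = fibF k a b + fibF (k + 1) a b := by
  induction k generalizing a b with
  | zero => simp [fibF]
  | succ k ih => simpa [fibF] using ih b (a + b)

-- invariant of A's while loop
theorem fibLoopA_inv (cnt : Nat) :
    ∀ fuel j, j + 1 ≤ cnt → cnt ≤ fuel + (j + 1) →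
      fibLoopA cnt fuel (1 :: gW (j + 1) 1 2) (j + 1) = 1 :: gW cnt 1 2 := by
  intro fuel
  induction fuel with
  | zero =>
    intro j h1 h2
    have : cnt = j + 1 := by omega
    subst this; rfl
  | succ f ih =>
    intro j h1 h2
    rw [fibLoopA]
    have hlen : (1 :: gW (j + 1) 1 2).length = j + 2 := by simp [length_gW]
    by_cases hc : j + 1 = cnt
    · subst hc; simp [hlen]
    · have hne : (1 :: gW (j + 1) 1 2).length ≠ cnt + 1 := by omega
      rw [if_neg hne]
      have hget1 : PySem.List.pyGetD (1 :: gW (j + 1) 1 2) ((j + 1 : Nat) : Int) 0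
          = fibF j 1 2 := by
        rw [PySem.List.pyGetD_natCast]
        simpa using gW_getD (j + 1) j 1 2 (by omega)
      have hval : PySem.List.pyGetD (1 :: gW (j + 1) 1 2) ((j + 1 : Nat) : Int) 0 +
          PySem.List.pyGetD (1 :: gW (j + 1) 1 2) (((j + 1 : Nat) : Int) - 1) 0
          = fibF (j + 1) 1 2 := by
        rw [hget1]
        have : (((j + 1 : Nat) : Int) - 1) = ((j : Nat) : Int) := by push_cast; ring
        rw [this, PySem.List.pyGetD_natCast]
        cases j with
        | zero => simp [fibF]
        | succ j' =>
          have : (1 :: gW (j' + 1 + 1) 1 2).getD (j' + 1) 0 = fibF j' 1 2 := by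
            simpa using gW_getD (j' + 1 + 1) j' 1 2 (by omega)
          rw [this]
          have e : fibF (j' + 1 + 1) 1 2 = fibF j' 1 2 + fibF (j' + 1) 1 2 := fibF_rec j' 1 2
          rw [e]; ring
      have hsnoc : (1 :: gW (j + 1) 1 2) ++ [fibF (j + 1) 1 2] = 1 :: gW (j + 2) 1 2 := by
        rw [gW_snoc (j + 1) 1 2, List.cons_append]
      calc fibLoopA cnt f
            ((1 :: gW (j + 1) 1 2) ++
              [PySem.List.pyGetD (1 :: gW (j + 1) 1 2) ((j + 1 : Nat) : Int) 0 +
               PySem.List.pyGetD (1 :: gW (j + 1) 1 2) (((j + 1 : Nat) : Int) - 1) 0])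
            (j + 1 + 1)
          = fibLoopA cnt f (1 :: gW (j + 2) 1 2) (j + 2) := by rw [hval, hsnoc]
        _ = 1 :: gW cnt 1 2 := ih (j + 1) (by omega) (by omega)

theorem getFib_eq (cnt : Nat) (h : 1 ≤ cnt) : get_fib_nums_by_cnt cnt = gW cnt 1 2 := by
  unfold get_fib_nums_by_cnt
  have h0 : ([1, 1] : List Int) = 1 :: gW 1 1 2 := rfl
  rw [h0, fibLoopA_inv cnt cnt 0 (by omega) (by omega)]
  rfl

-- A's per-index summand over the ascending index range equals fibSum
theorem sum_gW (cs : List Char) : ∀ (a b : Int),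
    ((PySem.List.pyRange 0 (cs.length : Int) 1).map
      (fun i => if PySem.List.pyGetD cs i ' ' = '1'
                then PySem.List.pyGetD (gW cs.length a b) i 0 else 0)).sum
      = fibSum cs a b := by
  induction cs with
  | nil => intro a b; simp [PySem.List.pyRange_one_eq_nil, fibSum]
  | cons c t ih =>
    intro a b
    have hcons : PySem.List.pyRange 0 (((c :: t).length : Int)) 1
        = 0 :: PySem.List.pyRange 1 (((c :: t).length : Int)) 1 := by
      apply PySem.List.pyRange_one_cons; simp
    rw [hcons, List.map_cons, List.sum_cons]
    have hshift : PySem.List.pyRange 1 (((c :: t).length : Int)) 1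
        = (PySem.List.pyRange 0 ((t.length : Int)) 1).map (fun k => k + 1) := by
      rw [PySem.List.pyRange_one, PySem.List.pyRange_one]
      simp [Function.comp_def]
      intro k _; omega
    rw [hshift, List.map_map]
    have hmap : ((PySem.List.pyRange 0 ((t.length : Int)) 1).map
        ((fun i => if PySem.List.pyGetD (c :: t) i ' ' = '1'
            then PySem.List.pyGetD (gW (c :: t).length a b) i 0 else 0) ∘ (fun k => k + 1)))
        = (PySem.List.pyRange 0 ((t.length : Int)) 1).map
          (fun i => if PySem.List.pyGetD t i ' ' = '1'
            then PySem.List.pyGetD (gW t.length b (a + b)) i 0 else 0) := by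
      apply List.map_congr_left
      intro k hk
      have hk' : 0 ≤ k ∧ k < (t.length : Int) := by
        have := (PySem.List.mem_pyRange_one (x := k) (a := 0) (b := (t.length : Int))).mp hk
        exact this
      obtain ⟨k', rfl⟩ : ∃ k' : Nat, k = (k' : Int) := ⟨k.toNat, by omega⟩
      have : ((k' : Int) + 1) = ((k' + 1 : Nat) : Int) := by push_cast; ring
      simp only [Function.comp_apply, this, PySem.List.pyGetD_natCast]
      simp [List.length_cons, gW]
    rw [hmap, ih b (a + b)]
    simp [List.length_cons, gW, fibSum]

-- B's fold computes fibSum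
theorem altLoop_eq (cs : List Char) : ∀ (r a b : Int),
    (cs.foldl (fun (st : Int × Int × Int) ch =>
        ((if ch = '1' then st.1 + st.2.1 else st.1), st.2.2, st.2.1 + st.2.2)) (r, a, b)).1
      = r + fibSum cs a b := by
  induction cs with
  | nil => intro r a b; simp [fibSum]
  | cons c t ih =>
    intro r a b
    simp only [List.foldl_cons, ih, fibSum]
    split <;> ring

theorem from_fib_to_10_eq (num : String) (h : num.toList ≠ []) :
    from_fib_to_10 num = from_fib_to_10_alt num := by
  unfold from_fib_to_10 from_fib_to_10_alt
  rw [PySem.Str.slice?_none_none_neg_one]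
  simp only [Option.getD_some]
  set cs : List Char := num.toList.reverse with hcs
  have hlen : 1 ≤ cs.length := by
    rw [hcs, List.length_reverse]
    have : num.toList.length ≠ 0 := by simpa [List.length_eq_zero_iff] using h
    omega
  have hcsl : (String.ofList cs).toList = cs := String.toList_ofList
  rw [hcsl]
  have hdata : get_fib_nums_by_cnt cs.length = gW cs.length 1 2 := getFib_eq cs.length hlen
  rw [hdata]
  have hdlen : ((gW cs.length 1 2).length : Int) = (cs.length : Int) := by
    rw [length_gW]
  rw [hdlen]
  -- descending range is the reverse of the ascending one
  have hrev : PySem.List.pyRange ((cs.length : Int) - 1) (-1) (-1)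
      = (PySem.List.pyRange 0 (cs.length : Int) 1).reverse := by
    have := PySem.List.pyRange_neg_one_eq_reverse ((cs.length : Int) - 1) (-1)
    simpa using this
  rw [hrev]
  -- pull the conditional add into a plain add, turn the foldl into a sum
  have hfun : (fun (res i : Int) =>
      if PySem.List.pyGetD cs i ' ' = '1' then res + PySem.List.pyGetD (gW cs.length 1 2) i 0
      else res)
      = (fun (res i : Int) => res +
          (if PySem.List.pyGetD cs i ' ' = '1' then PySem.List.pyGetD (gW cs.length 1 2) i 0
           else 0)) := by
    funext res i; split <;> simp
  rw [hfun, PySem.List.foldl_add, List.map_reverse, List.sum_reverse, sum_gW cs 1 2,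
    altLoop_eq cs 0 1 2]

-- ===== VERDICT (by name: the statement is the Claim_ definition above) =====
theorem from_fib_to_10_spec : Claim_equal_from_fib_to_10 := by
  intro num _ hpre
  exact from_fib_to_10_eq num hpre
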